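-- pv_equiv track=rewrite | github.com/MBasalla/python_snippets | util_general.py | merge_index_regions
-- ===== SOURCE A (Python) =====
-- def merge_index_regions(indices, tolerance=0):
--     # TODO: find anomaly peak detection based
--     """
--     Finds connected index regions based on threshold and statistical test,
--     window size and step size chosen at class initialization
--     Keyword arguments:
--         :param indices: list int -- a list of indices e.g. from a list or 1 dimension of an array
--         :param tolerance: int -- a tolerance value, defines small distance
--         at which non-connected anomaly regions should still be merged.
--         """
--     indices.sort()
--     index_regions = []
--     current_start = None
--     current_end = None
--     for anomaly in indices:
--         # initialize first anomaly region
--         if current_start is None: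
--             # start at current anomaly
--             current_start = anomaly
--             # end at the end of the rolling window used to calculate anomaly measure
--             current_end = anomaly + 1
--         # does current anomaly lie within or connect to the previous anomaly region
--         # or if not, is the distance smaller then the tolerance
--         elif current_end + tolerance >= anomaly:
--             # merge anomaly regions
--             new_end = anomaly + 1
--             # should rigorous testing be performed before merging?
--             current_end = new_end
--         else:
--             # else anomaly region is complete, save and create new anomaly region
--             index_regions += [(current_start, current_end)]
--             current_start = anomaly
--             current_end = anomaly + 1
--     index_regions += [(current_start, current_end)]
--     return index_regions
-- ===== SOURCE B (Python) =====
-- def merge_index_regions(indices, tolerance=0):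
--     indices.sort()
--     if not indices:
--         return []
--     gaps = [(a, b) for a, b in zip(indices, indices[1:]) if b - a > tolerance + 1]
--     starts = [indices[0]] + [b for a, b in gaps]
--     ends = [a + 1 for a, b in gaps] + [indices[-1] + 1]
--     return list(zip(starts, ends))
-- ===== Notes on version B (the rewrite author's own statement) =====
-- stated objective: alternative
-- what changed: Replaces A's accumulate-and-flush state machine (current_start/current_end updated per element) by a two-phase shape: filter the consecutive pairs of the sorted list for gaps > tolerance+1, then build the region list by zipping the derived start and end lists.
-- outside the precondition, e.g. on merge_index_regions([], 0): A returns [(None, None)], B returns []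
import Mathlib
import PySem

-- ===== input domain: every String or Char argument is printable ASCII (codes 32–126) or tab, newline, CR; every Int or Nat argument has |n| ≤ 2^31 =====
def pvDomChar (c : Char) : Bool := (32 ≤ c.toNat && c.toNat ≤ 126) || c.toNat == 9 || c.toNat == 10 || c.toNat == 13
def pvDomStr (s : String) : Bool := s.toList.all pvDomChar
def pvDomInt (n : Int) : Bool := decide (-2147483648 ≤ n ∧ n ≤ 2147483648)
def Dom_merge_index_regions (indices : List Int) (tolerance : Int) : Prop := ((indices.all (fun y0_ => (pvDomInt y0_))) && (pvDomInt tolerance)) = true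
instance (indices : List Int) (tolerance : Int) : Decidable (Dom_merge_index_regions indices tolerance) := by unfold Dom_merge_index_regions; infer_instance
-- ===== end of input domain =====

-- B differs from A only in structure; both sort the argument in place (side effect preserved in Source B,
-- return-value equivalence is what is proved here).

-- ===== PORT A =====
-- one step of A's for-loop over the sorted list; state = (index_regions, current_start, current_end)
def mirStepA (tolerance : Int) (st : List (Int × Int) × Option Int × Option Int) (anomaly : Int) :
    List (Int × Int) × Option Int × Option Int :=
  match st with
  | (regs, none, _) => (regs, some anomaly, some (anomaly + 1))
  | (regs, some cs, some ce) =>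
      if ce + tolerance ≥ anomaly then (regs, some cs, some (anomaly + 1))
      else (regs ++ [(cs, ce)], some anomaly, some (anomaly + 1))
  | (regs, some cs, none) => (regs, some cs, none)  -- unreachable: current_start/current_end are set together

def merge_index_regions (indices : List Int) (tolerance : Int) : List (Int × Int) :=
  let s := PySem.List.sorted indices (fun x => x) false   -- indices.sort()
  let st := s.foldl (mirStepA tolerance) ([], none, none)
  match st with
  | (regs, some cs, some ce) => regs ++ [(cs, ce)]
  -- empty input: Python appends (None, None), not a pair of ints; excluded by Pre_
  | (regs, _, _) => regs

-- ===== PORT B =====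
def merge_index_regions_alt (indices : List Int) (tolerance : Int) : List (Int × Int) :=
  let s := PySem.List.sorted indices (fun x => x) false   -- indices.sort()
  match s with
  | [] => []
  | h :: t =>
    let gaps := ((h :: t).zip t).filter (fun p => p.2 - p.1 > tolerance + 1)
    let starts := h :: gaps.map (fun p => p.2)
    let ends := (gaps.map (fun p => p.1 + 1)) ++ [(h :: t).getLast (by simp) + 1]
    starts.zip ends

-- ===== PRECONDITION & SPEC =====
-- Pre_ excludes exactly the empty list, on which A returns [(None, None)] — not a value of List (Int × Int).
def Pre_merge_index_regions (indices : List Int) (tolerance : Int) : Prop := indices ≠ []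
instance (indices : List Int) (tolerance : Int) : Decidable (Pre_merge_index_regions indices tolerance) := by unfold Pre_merge_index_regions; infer_instance
def pvWitness_merge_index_regions : List Int × Int := ([3, 1, 7, 2], 1)

def Spec_merge_index_regions (indices : List Int) (tolerance : Int) (out : List (Int × Int)) : Prop := out = merge_index_regions_alt indices tolerance
instance (indices : List Int) (tolerance : Int) (out : List (Int × Int)) : Decidable (Spec_merge_index_regions indices tolerance out) := by unfold Spec_merge_index_regions; infer_instance

-- ===== CLAIM (what is proved, stated in full; the proofs are below) =====
def Claim_equal_merge_index_regions : Prop := ∀ (indices : List Int) (tolerance : Int), Dom_merge_index_regions indices tolerance → Pre_merge_index_regions indices tolerance → Spec_merge_index_regions indices tolerance (merge_index_regions indices tolerance)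

-- ===== LEMMAS AND PROOFS =====

-- reference recursion: the run decomposition both ports compute
def mirRuns (tol : Int) : Int → Int → List Int → List (Int × Int)
  | cs, ce, [] => [(cs, ce)]
  | cs, ce, a :: t =>
      if ce + tol ≥ a then mirRuns tol cs (a + 1) t
      else (cs, ce) :: mirRuns tol a (a + 1) t

theorem mirA_loop (tol : Int) (t : List Int) :
    ∀ (regs : List (Int × Int)) (cs ce : Int),
    (match t.foldl (mirStepA tol) (regs, some cs, some ce) with
     | (r, some a, some b) => r ++ [(a, b)]
     | (r, _, _) => r) = regs ++ mirRuns tol cs ce t := by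
  induction t with
  | nil => intro regs cs ce; simp [mirRuns]
  | cons a t ih =>
      intro regs cs ce
      simp only [List.foldl_cons, mirStepA, mirRuns]
      by_cases h : ce + tol ≥ a
      · simp [h, ih]
      · simp [h, ih]

theorem mirB_zip (tol : Int) (t : List Int) :
    ∀ (cs x : Int),
    (cs :: (((x :: t).zip t).filter (fun p => p.2 - p.1 > tol + 1)).map (fun p => p.2)).zip
      ((((x :: t).zip t).filter (fun p => p.2 - p.1 > tol + 1)).map (fun p => p.1 + 1) ++
        [(x :: t).getLast (by simp) + 1]) = mirRuns tol cs (x + 1) t := by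
  induction t with
  | nil => intro cs x; simp [mirRuns]
  | cons b t ih =>
      intro cs x
      have hlast : (x :: b :: t).getLast (by simp) = (b :: t).getLast (by simp) := by
        simp [List.getLast]
      by_cases h : b - x > tol + 1
      · have h' : ¬ (x + 1 + tol ≥ b) := by omega
        simp only [List.zip_cons_cons, List.filter_cons, mirRuns, hlast]
        simp only [h, decide_true, if_pos, List.map_cons, List.cons_append, List.zip_cons_cons,
          if_neg h']
        exact congrArg _ (ih b b)
      · have h' : x + 1 + tol ≥ b := by omega
        simp only [List.zip_cons_cons, List.filter_cons, mirRuns, hlast]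
        simp only [h, decide_false, if_pos h']
        simpa using ih cs b

-- ===== VERDICT (by name: the statement is the Claim_ definition above) =====
theorem merge_index_regions_spec : Claim_equal_merge_index_regions := by
  intro indices tol _ hpre
  unfold Spec_merge_index_regions merge_index_regions merge_index_regions_alt
  have hs : PySem.List.sorted indices (fun x => x) false ≠ [] := by
    simpa [PySem.List.sorted_eq_nil_iff] using hpre
  cases hS : PySem.List.sorted indices (fun x => x) false with
  | nil => exact absurd hS hs
  | cons h t =>
      simp only [List.foldl_cons, mirStepA]
      rw [mirA_loop, mirB_zip]
      simp
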